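-- pv_equiv track=rewrite | github.com/Studojo1/job-outreach-svc | services/shared/ai/filter_calibration_ai.py | _classify_titles_by_cluster
-- ===== SOURCE A (Python) =====
-- from typing import Dict, Any, Tuple, List
--
-- def _classify_titles_by_cluster(titles: List[str]) -> Dict[str, List[str]]:
--     """Group titles by department functional cluster."""
--     clusters = {
--         "marketing_cluster": [],
--         "growth_cluster": [],
--         "content_cluster": [],
--         "product_cluster": [],
--         "design_cluster": [],
--         "seo_cluster": [],
--         "sales_cluster": [],
--         "data_cluster": [],
--         "engineering_cluster": [],
--         "other_cluster": []
--     }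
--     for title in titles:
--         t_lower = title.lower()
--         if "market" in t_lower:
--             clusters["marketing_cluster"].append(title)
--         elif "growth" in t_lower:
--             clusters["growth_cluster"].append(title)
--         elif "content" in t_lower or "copy" in t_lower:
--             clusters["content_cluster"].append(title)
--         elif "product" in t_lower:
--             clusters["product_cluster"].append(title)
--         elif "design" in t_lower or "creative" in t_lower:
--             clusters["design_cluster"].append(title)
--         elif "seo" in t_lower:
--             clusters["seo_cluster"].append(title)
--         elif "sale" in t_lower or "account" in t_lower or "revenue" in t_lower:
--             clusters["sales_cluster"].append(title)
--         elif "data" in t_lower or "analytic" in t_lower: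
--             clusters["data_cluster"].append(title)
--         elif "engineer" in t_lower or "develop" in t_lower or "tech" in t_lower:
--             clusters["engineering_cluster"].append(title)
--         else:
--             clusters["other_cluster"].append(title)
--     return clusters
-- ===== SOURCE B (Python) =====
-- from typing import Dict, List
--
-- _TABLE = (
--     ("marketing_cluster", ("market",)),
--     ("growth_cluster", ("growth",)),
--     ("content_cluster", ("content", "copy")),
--     ("product_cluster", ("product",)),
--     ("design_cluster", ("design", "creative")),
--     ("seo_cluster", ("seo",)),
--     ("sales_cluster", ("sale", "account", "revenue")),
--     ("data_cluster", ("data", "analytic")),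
--     ("engineering_cluster", ("engineer", "develop", "tech")),
-- )
--
-- def _cluster_of(title: str) -> str:
--     t = title.lower()
--     return next((name for name, kws in _TABLE if any(k in t for k in kws)),
--                 "other_cluster")
--
-- def _classify_titles_by_cluster(titles: List[str]) -> Dict[str, List[str]]:
--     names = [name for name, _ in _TABLE] + ["other_cluster"]
--     labeled = [(_cluster_of(t), t) for t in titles]
--     return {name: [t for c, t in labeled if c == name] for name in names}
-- ===== Notes on version B (the rewrite author's own statement) =====
-- stated objective: idiomatic
-- what changed: Replaces the ten-branch elif cascade and single append-loop with a declarative keyword table, a _cluster_of classifier using next(), one labeling pass over the titles, and a dict comprehension that builds each cluster by filtering the labeled list per name.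
import Mathlib
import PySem

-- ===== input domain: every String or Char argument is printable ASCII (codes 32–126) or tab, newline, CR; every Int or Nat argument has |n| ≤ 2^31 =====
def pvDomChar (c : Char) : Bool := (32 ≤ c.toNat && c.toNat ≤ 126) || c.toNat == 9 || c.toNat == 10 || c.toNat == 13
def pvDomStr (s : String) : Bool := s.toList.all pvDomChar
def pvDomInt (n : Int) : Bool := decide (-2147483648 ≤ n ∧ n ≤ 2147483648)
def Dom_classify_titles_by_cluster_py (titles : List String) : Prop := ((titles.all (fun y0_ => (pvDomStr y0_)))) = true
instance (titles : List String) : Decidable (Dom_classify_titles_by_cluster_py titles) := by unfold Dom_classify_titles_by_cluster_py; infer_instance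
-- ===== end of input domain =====

-- B replaces A's ten-branch elif cascade and single dispatch loop by a keyword table, a
-- first-match classifier and one filter pass per cluster name (idiomatic; same cost).


-- ===== PORT A =====
def classify_titles_by_cluster_py (titles : List String) : List (String × List String) :=
  let clusters : PySem.Dict String (List String) := PySem.Dict.ofList
    [("marketing_cluster", []), ("growth_cluster", []), ("content_cluster", []),
     ("product_cluster", []), ("design_cluster", []), ("seo_cluster", []),
     ("sales_cluster", []), ("data_cluster", []), ("engineering_cluster", []),
     ("other_cluster", [])]
  (titles.foldl (fun d title =>
    let t_lower := PySem.Str.lower title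
    if PySem.Str.isIn "market" t_lower then
      d.modify "marketing_cluster" [] (· ++ [title])
    else if PySem.Str.isIn "growth" t_lower then
      d.modify "growth_cluster" [] (· ++ [title])
    else if PySem.Str.isIn "content" t_lower || PySem.Str.isIn "copy" t_lower then
      d.modify "content_cluster" [] (· ++ [title])
    else if PySem.Str.isIn "product" t_lower then
      d.modify "product_cluster" [] (· ++ [title])
    else if PySem.Str.isIn "design" t_lower || PySem.Str.isIn "creative" t_lower then
      d.modify "design_cluster" [] (· ++ [title])
    else if PySem.Str.isIn "seo" t_lower then
      d.modify "seo_cluster" [] (· ++ [title])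
    else if PySem.Str.isIn "sale" t_lower || PySem.Str.isIn "account" t_lower || PySem.Str.isIn "revenue" t_lower then
      d.modify "sales_cluster" [] (· ++ [title])
    else if PySem.Str.isIn "data" t_lower || PySem.Str.isIn "analytic" t_lower then
      d.modify "data_cluster" [] (· ++ [title])
    else if PySem.Str.isIn "engineer" t_lower || PySem.Str.isIn "develop" t_lower || PySem.Str.isIn "tech" t_lower then
      d.modify "engineering_cluster" [] (· ++ [title])
    else
      d.modify "other_cluster" [] (· ++ [title])) clusters).items

-- ===== PORT B =====
def pvTable : List (String × List String) :=
  [("marketing_cluster", ["market"]),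
   ("growth_cluster", ["growth"]),
   ("content_cluster", ["content", "copy"]),
   ("product_cluster", ["product"]),
   ("design_cluster", ["design", "creative"]),
   ("seo_cluster", ["seo"]),
   ("sales_cluster", ["sale", "account", "revenue"]),
   ("data_cluster", ["data", "analytic"]),
   ("engineering_cluster", ["engineer", "develop", "tech"])]

def pvClusterOf (title : String) : String :=
  let t := PySem.Str.lower title
  ((pvTable.find? (fun p => p.2.any (fun k => PySem.Str.isIn k t))).map (·.1)).getD "other_cluster"

def classify_titles_by_cluster_py_alt (titles : List String) : List (String × List String) :=
  let names := pvTable.map (·.1) ++ ["other_cluster"]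
  let labeled := titles.map (fun t => (pvClusterOf t, t))
  names.map (fun name => (name, (labeled.filter (fun p => p.1 == name)).map (·.2)))

-- ===== PRECONDITION & SPEC =====
def Spec_classify_titles_by_cluster_py (titles : List String) (out : List (String × List String)) : Prop := out = classify_titles_by_cluster_py_alt titles
instance (titles : List String) (out : List (String × List String)) : Decidable (Spec_classify_titles_by_cluster_py titles out) := by unfold Spec_classify_titles_by_cluster_py; infer_instance

-- ===== CLAIM (what is proved, stated in full; the proofs are below) =====
def Claim_equal_classify_titles_by_cluster_py : Prop := ∀ (titles : List String), Dom_classify_titles_by_cluster_py titles → Spec_classify_titles_by_cluster_py titles (classify_titles_by_cluster_py titles)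

-- ===== LEMMAS AND PROOFS =====

-- the ten cluster names, in the order A's dict literal fixes
def pvNames : List String := pvTable.map (·.1) ++ ["other_cluster"]

-- A's elif cascade picks exactly the cluster B's classifier names
theorem pvStep_eq (d : PySem.Dict String (List String)) (title : String) :
    (let t_lower := PySem.Str.lower title
     if PySem.Str.isIn "market" t_lower then
       d.modify "marketing_cluster" [] (· ++ [title])
     else if PySem.Str.isIn "growth" t_lower then
       d.modify "growth_cluster" [] (· ++ [title])
     else if PySem.Str.isIn "content" t_lower || PySem.Str.isIn "copy" t_lower then
       d.modify "content_cluster" [] (· ++ [title])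
     else if PySem.Str.isIn "product" t_lower then
       d.modify "product_cluster" [] (· ++ [title])
     else if PySem.Str.isIn "design" t_lower || PySem.Str.isIn "creative" t_lower then
       d.modify "design_cluster" [] (· ++ [title])
     else if PySem.Str.isIn "seo" t_lower then
       d.modify "seo_cluster" [] (· ++ [title])
     else if PySem.Str.isIn "sale" t_lower || PySem.Str.isIn "account" t_lower || PySem.Str.isIn "revenue" t_lower then
       d.modify "sales_cluster" [] (· ++ [title])
     else if PySem.Str.isIn "data" t_lower || PySem.Str.isIn "analytic" t_lower then
       d.modify "data_cluster" [] (· ++ [title])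
     else if PySem.Str.isIn "engineer" t_lower || PySem.Str.isIn "develop" t_lower || PySem.Str.isIn "tech" t_lower then
       d.modify "engineering_cluster" [] (· ++ [title])
     else
       d.modify "other_cluster" [] (· ++ [title])) =
    d.modify (pvClusterOf title) [] (· ++ [title]) := by
  simp only [pvClusterOf, pvTable, List.find?, List.any_cons, List.any_nil, Bool.or_false]
  cases _h1 : PySem.Str.isIn "market" (PySem.Str.lower title) with
  | true => rfl
  | false =>
    cases _h2 : PySem.Str.isIn "growth" (PySem.Str.lower title) with
    | true => rfl
    | false =>
      cases _h3 : PySem.Str.isIn "content" (PySem.Str.lower title) with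
      | true => rfl
      | false =>
        cases _h4 : PySem.Str.isIn "copy" (PySem.Str.lower title) with
        | true => rfl
        | false =>
          cases _h5 : PySem.Str.isIn "product" (PySem.Str.lower title) with
          | true => rfl
          | false =>
            cases _h6 : PySem.Str.isIn "design" (PySem.Str.lower title) with
            | true => rfl
            | false =>
              cases _h7 : PySem.Str.isIn "creative" (PySem.Str.lower title) with
              | true => rfl
              | false =>
                cases _h8 : PySem.Str.isIn "seo" (PySem.Str.lower title) with
                | true => rfl
                | false =>
                  cases _h9 : PySem.Str.isIn "sale" (PySem.Str.lower title) with
                  | true => rfl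
                  | false =>
                    cases _h10 : PySem.Str.isIn "account" (PySem.Str.lower title) with
                    | true => rfl
                    | false =>
                      cases _h11 : PySem.Str.isIn "revenue" (PySem.Str.lower title) with
                      | true => rfl
                      | false =>
                        cases _h12 : PySem.Str.isIn "data" (PySem.Str.lower title) with
                        | true => rfl
                        | false =>
                          cases _h13 : PySem.Str.isIn "analytic" (PySem.Str.lower title) with
                          | true => rfl
                          | false =>
                            cases _h14 : PySem.Str.isIn "engineer" (PySem.Str.lower title) with
                            | true => rfl
                            | false =>
                              cases _h15 : PySem.Str.isIn "develop" (PySem.Str.lower title) with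
                              | true => rfl
                              | false =>
                                cases _h16 : PySem.Str.isIn "tech" (PySem.Str.lower title) with
                                | true => rfl
                                | false =>
                                  rfl

theorem pvClusterOf_mem (title : String) : pvClusterOf title ∈ pvNames := by
  simp only [pvClusterOf, pvNames]
  cases h : pvTable.find? (fun p => p.2.any (fun k => PySem.Str.isIn k (PySem.Str.lower title))) with
  | none => simp
  | some p =>
    simp only [Option.map_some, Option.getD_some]
    exact List.mem_append_left _ (List.mem_map_of_mem (List.mem_of_find?_eq_some h))

theorem pvNames_nodup : pvNames.Nodup := by decide

-- loop invariant: the dict's items stay pvNames tagged with accumulated lists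
theorem pvLoop_items (ts : List String) (g : String → List String)
    (d : PySem.Dict String (List String))
    (hd : d.items = pvNames.map (fun n => (n, g n))) :
    (ts.foldl (fun d title => d.modify (pvClusterOf title) [] (· ++ [title])) d).items =
      pvNames.map (fun n => (n, g n ++ ts.filter (fun t => pvClusterOf t == n))) := by
  induction ts generalizing d g with
  | nil => simpa using hd
  | cons t ts ih =>
    have hkeys : d.keys = pvNames := by
      unfold PySem.Dict.keys
      rw [hd, List.map_map]; simp [Function.comp_def]
    have hmemk : pvClusterOf t ∈ pvNames := pvClusterOf_mem t
    have hcont : d.contains (pvClusterOf t) = true := by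
      rw [PySem.Dict.contains_iff_mem_keys, hkeys]; exact hmemk
    have hmemi : (pvClusterOf t, g (pvClusterOf t)) ∈ d.items := by
      rw [hd]; exact List.mem_map_of_mem hmemk
    have hnd : d.keys.Nodup := by rw [hkeys]; exact pvNames_nodup
    have hget : d.getD (pvClusterOf t) [] = g (pvClusterOf t) :=
      PySem.Dict.getD_of_mem_items d hmemi hnd []
    have hstep : (d.modify (pvClusterOf t) [] (· ++ [t])).items =
        pvNames.map (fun n => (n, (if n = pvClusterOf t then g n ++ [t] else g n))) := by
      rw [PySem.Dict.modify, PySem.Dict.items_insert_of_contains _ _ hcont, hd, hget,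
        List.map_map]
      refine List.map_congr_left (fun n _ => ?_)
      by_cases hn : n = pvClusterOf t
      · subst hn; simp
      · simp [hn]
    rw [List.foldl_cons, ih _ _ hstep]
    refine List.map_congr_left (fun n _ => ?_)
    by_cases hn : pvClusterOf t = n
    · simp [hn]
    · simp [hn, Ne.symm hn]

-- ===== VERDICT (by name: the statement is the Claim_ definition above) =====
theorem classify_titles_by_cluster_py_spec : Claim_equal_classify_titles_by_cluster_py := by
  intro titles _
  show classify_titles_by_cluster_py titles = classify_titles_by_cluster_py_alt titles
  unfold classify_titles_by_cluster_py classify_titles_by_cluster_py_alt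
  simp only [pvStep_eq]
  rw [pvLoop_items titles (fun _ => []) _ (by rfl)]
  simp [pvNames, List.filter_map, Function.comp_def]
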